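-- pv_equiv track=rewrite | github.com/MrViincciLeRoy/News-forex | hf_method5_embeddings.py | _describe_cluster
-- ===== SOURCE A (Python) =====
-- from typing import List, Dict, Tuple
--
-- def _describe_cluster(events: List[Dict]) -> str:
--     """Generate description for event cluster"""
--     event_names = [e.get('event', '').lower() for e in events]
--
--     if any('cpi' in name or 'inflation' in name for name in event_names):
--         return "Inflation & Price Data Events"
--     elif any('payroll' in name or 'employment' in name or 'job' in name for name in event_names):
--         return "Employment & Labor Market Events"
--     elif any('fed' in name or 'fomc' in name or 'rate' in name for name in event_names):
--         return "Monetary Policy Events"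
--     elif any('gdp' in name or 'growth' in name for name in event_names):
--         return "Economic Growth Events"
--     else:
--         return "Mixed Economic Events"
-- ===== SOURCE B (Python) =====
-- from typing import List, Dict, Tuple
--
-- _TABLE = [
--     (("cpi", "inflation"), "Inflation & Price Data Events"),
--     (("payroll", "employment", "job"), "Employment & Labor Market Events"),
--     (("fed", "fomc", "rate"), "Monetary Policy Events"),
--     (("gdp", "growth"), "Economic Growth Events"),
-- ]
--
-- def _describe_cluster(events: List[Dict]) -> str:
--     """Generate description for event cluster"""
--     best = len(_TABLE)
--     for e in events:
--         name = e.get('event', '').lower()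
--         for i, (keywords, _desc) in enumerate(_TABLE):
--             if i < best and any(k in name for k in keywords):
--                 best = i
--                 break
--     return _TABLE[best][1] if best < len(_TABLE) else "Mixed Economic Events"
-- ===== Notes on version B (the rewrite author's own statement) =====
-- stated objective: alternative
-- what changed: Replaced the four sequential any()-scans over the event-name list by a priority table of (keywords, description) pairs and a single pass over the events that maintains the best (lowest) matching category index, returning that category's description or the default.
import Mathlib
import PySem

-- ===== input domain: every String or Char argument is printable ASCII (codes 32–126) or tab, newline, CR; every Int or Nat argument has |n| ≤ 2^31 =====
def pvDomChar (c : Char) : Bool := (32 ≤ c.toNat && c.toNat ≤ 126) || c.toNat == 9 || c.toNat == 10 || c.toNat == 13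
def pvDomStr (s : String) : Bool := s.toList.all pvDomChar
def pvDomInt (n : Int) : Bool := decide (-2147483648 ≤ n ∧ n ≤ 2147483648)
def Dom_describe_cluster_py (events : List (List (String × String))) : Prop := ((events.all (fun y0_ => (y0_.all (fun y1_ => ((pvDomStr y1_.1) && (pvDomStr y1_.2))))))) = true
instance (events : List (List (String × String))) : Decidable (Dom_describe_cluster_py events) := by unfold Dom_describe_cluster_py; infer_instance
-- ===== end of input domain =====

-- B replaces A's four sequential any()-scans by a priority-ordered keyword table and a
-- single pass over the events maintaining the best matching category index (objective: alternative).

-- ===== PORT A =====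
def describe_cluster_py (events : List (List (String × String))) : String :=
  let event_names := events.map (fun e => PySem.Str.lower ((PySem.Dict.mk e).getD "event" ""))
  if event_names.any (fun name => PySem.Str.isIn "cpi" name || PySem.Str.isIn "inflation" name) then
    "Inflation & Price Data Events"
  else if event_names.any (fun name => PySem.Str.isIn "payroll" name || PySem.Str.isIn "employment" name || PySem.Str.isIn "job" name) then
    "Employment & Labor Market Events"
  else if event_names.any (fun name => PySem.Str.isIn "fed" name || PySem.Str.isIn "fomc" name || PySem.Str.isIn "rate" name) then
    "Monetary Policy Events"
  else if event_names.any (fun name => PySem.Str.isIn "gdp" name || PySem.Str.isIn "growth" name) then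
    "Economic Growth Events"
  else
    "Mixed Economic Events"

-- ===== PORT B =====
def pvTable : List (List String × String) :=
  [(["cpi", "inflation"], "Inflation & Price Data Events"),
   (["payroll", "employment", "job"], "Employment & Labor Market Events"),
   (["fed", "fomc", "rate"], "Monetary Policy Events"),
   (["gdp", "growth"], "Economic Growth Events")]

-- inner loop of B: first table index i (starting at i0) with i < best whose keywords match, else best
def pvScan (name : String) (best : Nat) : Nat → List (List String × String) → Nat
  | _, [] => best
  | i, (kws, _) :: rest =>
    if i < best ∧ kws.any (fun k => PySem.Str.isIn k name) then i
    else pvScan name best (i + 1) rest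

def describe_cluster_py_alt (events : List (List (String × String))) : String :=
  let best := events.foldl
    (fun best e =>
      let name := PySem.Str.lower ((PySem.Dict.mk e).getD "event" "")
      pvScan name best 0 pvTable)
    pvTable.length
  if best < pvTable.length then (pvTable.getD best ([], "")).2 else "Mixed Economic Events"

-- ===== PRECONDITION & SPEC =====
def Spec_describe_cluster_py (events : List (List (String × String))) (out : String) : Prop := out = describe_cluster_py_alt events
instance (events : List (List (String × String))) (out : String) : Decidable (Spec_describe_cluster_py events out) := by unfold Spec_describe_cluster_py; infer_instance

-- ===== CLAIM (what is proved, stated in full; the proofs are below) =====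
def Claim_equal_describe_cluster_py : Prop := ∀ (events : List (List (String × String))), Dom_describe_cluster_py events → Spec_describe_cluster_py events (describe_cluster_py events)

-- ===== LEMMAS AND PROOFS =====

-- category match predicates (shared characterisation of both programs)
def pvM1 (name : String) : Bool := PySem.Str.isIn "cpi" name || PySem.Str.isIn "inflation" name
def pvM2 (name : String) : Bool := PySem.Str.isIn "payroll" name || (PySem.Str.isIn "employment" name || PySem.Str.isIn "job" name)
def pvM3 (name : String) : Bool := PySem.Str.isIn "fed" name || (PySem.Str.isIn "fomc" name || PySem.Str.isIn "rate" name)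
def pvM4 (name : String) : Bool := PySem.Str.isIn "gdp" name || PySem.Str.isIn "growth" name

-- index of the first category matching name, 4 if none
def pvIdx1 (name : String) : Nat :=
  if pvM1 name then 0 else if pvM2 name then 1 else if pvM3 name then 2 else if pvM4 name then 3 else 4

-- index of the best category over a list of names
def pvIdx (names : List String) : Nat :=
  if names.any pvM1 then 0 else if names.any pvM2 then 1
  else if names.any pvM3 then 2 else if names.any pvM4 then 3 else 4

theorem pvAny1 (name : String) : (["cpi", "inflation"].any fun k => PySem.Str.isIn k name) = pvM1 name := by
  simp [pvM1]
theorem pvAny2 (name : String) : (["payroll", "employment", "job"].any fun k => PySem.Str.isIn k name) = pvM2 name := by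
  simp [pvM2]
theorem pvAny3 (name : String) : (["fed", "fomc", "rate"].any fun k => PySem.Str.isIn k name) = pvM3 name := by
  simp [pvM3]
theorem pvAny4 (name : String) : (["gdp", "growth"].any fun k => PySem.Str.isIn k name) = pvM4 name := by
  simp [pvM4]

set_option maxHeartbeats 1000000 in
theorem pvScan_eq (name : String) (best : Nat) (hb : best ≤ 4) :
    pvScan name best 0 pvTable = min best (pvIdx1 name) := by
  simp only [pvTable, pvScan, pvAny1, pvAny2, pvAny3, pvAny4, pvIdx1]
  by_cases h1 : pvM1 name = true <;> by_cases h2 : pvM2 name = true <;>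
  by_cases h3 : pvM3 name = true <;> by_cases h4 : pvM4 name = true <;>
    simp only [h1, h2, h3, h4, Bool.false_eq_true, and_true, and_false, if_true,
      if_neg (fun h : False => h.elim)] <;> first | omega | (split_ifs <;> omega)

set_option maxHeartbeats 1000000 in
theorem pvIdx_cons (name : String) (names : List String) :
    pvIdx (name :: names) = min (pvIdx1 name) (pvIdx names) := by
  simp only [pvIdx, pvIdx1, List.any_cons]
  split_ifs <;> simp_all

def pvName (e : List (String × String)) : String :=
  PySem.Str.lower ((PySem.Dict.mk e).getD "event" "")

theorem pvFold_eq (events : List (List (String × String))) (best : Nat) (hb : best ≤ 4) :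
    events.foldl (fun b e => pvScan (pvName e) b 0 pvTable) best
      = min best (pvIdx (events.map pvName)) := by
  induction events generalizing best with
  | nil => simp [pvIdx]; omega
  | cons e es ih =>
    rw [List.foldl_cons, pvScan_eq _ _ hb, ih _ (by omega), List.map_cons, pvIdx_cons]
    omega

theorem pvIdx_le (names : List String) : pvIdx names ≤ 4 := by
  simp only [pvIdx]; split_ifs <;> omega

theorem pvAnyA1 (names : List String) :
    (names.any fun name => PySem.Str.isIn "cpi" name || PySem.Str.isIn "inflation" name)
      = names.any pvM1 := rfl
theorem pvAnyA2 (names : List String) :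
    (names.any fun name => PySem.Str.isIn "payroll" name || PySem.Str.isIn "employment" name || PySem.Str.isIn "job" name)
      = names.any pvM2 :=
  congrArg names.any (funext fun n => by simp [pvM2, Bool.or_assoc])
theorem pvAnyA3 (names : List String) :
    (names.any fun name => PySem.Str.isIn "fed" name || PySem.Str.isIn "fomc" name || PySem.Str.isIn "rate" name)
      = names.any pvM3 :=
  congrArg names.any (funext fun n => by simp [pvM3, Bool.or_assoc])
theorem pvAnyA4 (names : List String) :
    (names.any fun name => PySem.Str.isIn "gdp" name || PySem.Str.isIn "growth" name)
      = names.any pvM4 := rfl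

-- ===== VERDICT (by name: the statement is the Claim_ definition above) =====
set_option maxHeartbeats 1000000 in
theorem describe_cluster_py_spec : Claim_equal_describe_cluster_py := by
  intro events _
  show describe_cluster_py events = describe_cluster_py_alt events
  unfold describe_cluster_py describe_cluster_py_alt
  dsimp only
  rw [show (fun (best : Nat) (e : List (String × String)) =>
        pvScan (PySem.Str.lower ((PySem.Dict.mk e).getD "event" "")) best 0 pvTable)
      = (fun b e => pvScan (pvName e) b 0 pvTable) from rfl,
    show pvTable.length = 4 from rfl,
    pvFold_eq events 4 (le_refl 4),
    min_eq_right (pvIdx_le _)]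
  rw [show (fun e => PySem.Str.lower ((PySem.Dict.mk e).getD "event" "")) = pvName from rfl]
  simp only [pvIdx]
  rw [pvAnyA1 (events.map pvName), pvAnyA2 (events.map pvName), pvAnyA3 (events.map pvName), pvAnyA4 (events.map pvName)]
  split_ifs <;> first | omega | simp [pvTable]
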